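-- pv_equiv track=rewrite | github.com/luismarcelovaf/Auto-Coder | src/code_crafter/project.py | chunk_files_by_tokens
-- ===== SOURCE A (Python) =====
-- CHARS_PER_TOKEN = 4
--
-- MAX_TOKENS_PER_CHUNK = 100_000
--
-- def _estimate_tokens(text: str) -> int:
--     """Estimate the number of tokens in a text."""
--     return len(text) // CHARS_PER_TOKEN
--
-- def create_file_content_block(file_path: str, content: str) -> str:
--     """Create a formatted block for a file's content."""
--     return f"### {file_path}\n```\n{content}\n```\n\n"
--
-- def chunk_files_by_tokens(
--     files: list[tuple[str, str]],
--     max_tokens: int = MAX_TOKENS_PER_CHUNK,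
-- ) -> list[list[tuple[str, str]]]:
--     """Split files into chunks that fit within token limits.
--
--     Args:
--         files: List of (path, content) tuples
--         max_tokens: Maximum tokens per chunk
--
--     Returns:
--         List of chunks, each chunk is a list of (path, content) tuples
--     """
--     chunks: list[list[tuple[str, str]]] = []
--     current_chunk: list[tuple[str, str]] = []
--     current_tokens = 0
--
--     for file_path, content in files:
--         # Estimate tokens for this file (including formatting)
--         file_block = create_file_content_block(file_path, content)
--         file_tokens = _estimate_tokens(file_block)
--
--         # If single file exceeds limit, truncate it
--         if file_tokens > max_tokens:
--             # Truncate content to fit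
--             max_content_chars = (max_tokens - 500) * CHARS_PER_TOKEN  # Leave room for formatting
--             truncated_content = content[:max_content_chars] + f"\n\n... [TRUNCATED - file too large, showing first {max_content_chars} characters]"
--             file_tokens = _estimate_tokens(create_file_content_block(file_path, truncated_content))
--             content = truncated_content
--
--         # If adding this file exceeds the limit, start a new chunk
--         if current_tokens + file_tokens > max_tokens and current_chunk:
--             chunks.append(current_chunk)
--             current_chunk = []
--             current_tokens = 0
--
--         current_chunk.append((file_path, content))
--         current_tokens += file_tokens
--
--     # Don't forget the last chunk
--     if current_chunk:
--         chunks.append(current_chunk)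
--
--     return chunks
-- ===== SOURCE B (Python) =====
-- CHARS_PER_TOKEN = 4
--
-- MAX_TOKENS_PER_CHUNK = 100_000
--
--
-- def chunk_files_by_tokens(
--     files: list[tuple[str, str]],
--     max_tokens: int = MAX_TOKENS_PER_CHUNK,
-- ) -> list[list[tuple[str, str]]]:
--     """Pack files into token-limited chunks by computing each chunk's span and slicing."""
--     # prepare: per-file (path, possibly-truncated content, token estimate)
--     records = []
--     for path, content in files:
--         block = f"### {path}\n```\n{content}\n```\n\n"
--         tokens = len(block) // CHARS_PER_TOKEN
--         if tokens > max_tokens: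
--             mcc = (max_tokens - 500) * CHARS_PER_TOKEN
--             content = content[:mcc] + f"\n\n... [TRUNCATED - file too large, showing first {mcc} characters]"
--             tokens = len(f"### {path}\n```\n{content}\n```\n\n") // CHARS_PER_TOKEN
--         records.append((path, content, tokens))
--
--     # pack: each chunk is the maximal span records[i:j] whose token sum stays
--     # within max_tokens (the first record taken unconditionally); slice it out.
--     chunks = []
--     i, n = 0, len(records)
--     while i < n:
--         total = records[i][2]
--         j = i + 1
--         while j < n and total + records[j][2] <= max_tokens:
--             total += records[j][2]
--             j += 1
--         chunks.append([(p, c) for p, c, _ in records[i:j]])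
--         i = j
--     return chunks
-- ===== Notes on version B (the rewrite author's own statement) =====
-- stated objective: alternative
-- what changed: Replaces A's fused state machine (chunks/current_chunk/current_tokens with flush-on-overflow) by a two-phase scheme: precompute per-file records with token estimates, then for each chunk find the maximal index span whose token sum fits and slice it out of the record table - no running chunk accumulator exists.
import Mathlib
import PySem

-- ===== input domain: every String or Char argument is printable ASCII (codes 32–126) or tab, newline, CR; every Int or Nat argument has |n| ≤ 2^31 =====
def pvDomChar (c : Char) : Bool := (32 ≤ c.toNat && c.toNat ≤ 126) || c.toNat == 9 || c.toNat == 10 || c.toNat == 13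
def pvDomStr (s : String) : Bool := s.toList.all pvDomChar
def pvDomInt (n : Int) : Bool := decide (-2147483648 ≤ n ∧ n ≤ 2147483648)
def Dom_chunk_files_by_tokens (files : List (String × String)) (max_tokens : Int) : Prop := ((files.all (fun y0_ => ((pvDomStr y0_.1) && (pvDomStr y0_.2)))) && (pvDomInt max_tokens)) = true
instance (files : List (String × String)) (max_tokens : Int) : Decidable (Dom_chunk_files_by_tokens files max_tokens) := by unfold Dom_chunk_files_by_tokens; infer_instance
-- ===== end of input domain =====

-- B replaces A's fused chunks/current_chunk/current_tokens state machine by a record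
-- table plus per-chunk maximal-span search and slicing — objective: alternative, same cost.

-- ===== PORT A =====
-- f"### {file_path}\n```\n{content}\n```\n\n", on Char lists (exact for the f-string)
def pvBlockChars (p c : List Char) : List Char :=
  "### ".toList ++ p ++ "\n```\n".toList ++ c ++ "\n```\n\n".toList

-- _estimate_tokens: len(text) // CHARS_PER_TOKEN
def pvEstimate (text : List Char) : Int :=
  PySem.Int.floordiv (text.length : Int) 4

-- the TRUNCATED suffix message, exact f-string
def pvTruncMsg (mcc : Int) : List Char :=
  "\n\n... [TRUNCATED - file too large, showing first ".toList ++
    PySem.Int.toChars mcc ++ " characters]".toList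

-- one iteration of A's loop, state = (chunks, current_chunk, current_tokens)
def pvStepA (max_tokens : Int)
    (st : List (List (String × String)) × List (String × String) × Int)
    (fp : String × String) :
    List (List (String × String)) × List (String × String) × Int :=
  let file_block := pvBlockChars fp.1.toList fp.2.toList
  let file_tokens := pvEstimate file_block
  let ct :=
    if max_tokens < file_tokens then
      let mcc := (max_tokens - 500) * 4
      let truncated := PySem.List.slice fp.2.toList none (some mcc) ++ pvTruncMsg mcc
      (String.ofList truncated, pvEstimate (pvBlockChars fp.1.toList truncated))
    else (fp.2, file_tokens)
  let st' :=
    if max_tokens < st.2.2 + ct.2 ∧ st.2.1 ≠ [] then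
      (st.1 ++ [st.2.1], ([] : List (String × String)), (0 : Int))
    else st
  (st'.1, st'.2.1 ++ [(fp.1, ct.1)], st'.2.2 + ct.2)

def chunk_files_by_tokens (files : List (String × String)) (max_tokens : Int) :
    List (List (String × String)) :=
  let st := files.foldl (pvStepA max_tokens) ([], [], 0)
  if st.2.1 ≠ [] then st.1 ++ [st.2.1] else st.1

-- ===== PORT B =====
-- record preparation: (path, possibly-truncated content, token estimate)
def pvPrepare (max_tokens : Int) (fp : String × String) : String × String × Int :=
  let block := pvBlockChars fp.1.toList fp.2.toList
  let tokens := pvEstimate block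
  if max_tokens < tokens then
    let mcc := (max_tokens - 500) * 4
    let content := PySem.List.slice fp.2.toList none (some mcc) ++ pvTruncMsg mcc
    (fp.1, String.ofList content, pvEstimate (pvBlockChars fp.1.toList content))
  else (fp.1, fp.2, tokens)

-- inner while: length of the maximal extension of a chunk already holding `total` tokens
def pvSpan (max_tokens : Int) : Int → List (String × String × Int) → Nat
  | _, [] => 0
  | total, r :: rest =>
    if total + r.2.2 ≤ max_tokens then 1 + pvSpan max_tokens (total + r.2.2) rest else 0

-- outer while: slice out records[i:j] per chunk (here: take/drop on the record suffix)
def pvPack (max_tokens : Int) : List (String × String × Int) → List (List (String × String))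
  | [] => []
  | r :: rest =>
    let k := pvSpan max_tokens r.2.2 rest
    ((r :: rest.take k).map (fun x => (x.1, x.2.1))) :: pvPack max_tokens (rest.drop k)
termination_by l => l.length
decreasing_by simp

def chunk_files_by_tokens_alt (files : List (String × String)) (max_tokens : Int) :
    List (List (String × String)) :=
  pvPack max_tokens (files.map (pvPrepare max_tokens))

-- ===== PRECONDITION & SPEC =====
def Spec_chunk_files_by_tokens (files : List (String × String)) (max_tokens : Int) (out : List (List (String × String))) : Prop := out = chunk_files_by_tokens_alt files max_tokens
instance (files : List (String × String)) (max_tokens : Int) (out : List (List (String × String))) : Decidable (Spec_chunk_files_by_tokens files max_tokens out) := by unfold Spec_chunk_files_by_tokens; infer_instance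

-- ===== CLAIM =====
def Claim_equal_chunk_files_by_tokens : Prop := ∀ (files : List (String × String)) (max_tokens : Int), Dom_chunk_files_by_tokens files max_tokens → Spec_chunk_files_by_tokens files max_tokens (chunk_files_by_tokens files max_tokens)

-- ===== LEMMAS AND PROOFS =====

def pvProj (r : String × String × Int) : String × String := (r.1, r.2.1)

theorem pvPack_nil (mt : Int) : pvPack mt [] = [] := by
  unfold pvPack; rfl

theorem pvPack_cons (mt : Int) (r : String × String × Int) (rest : List (String × String × Int)) :
    pvPack mt (r :: rest) =
      ((r :: rest.take (pvSpan mt r.2.2 rest)).map (fun x => (x.1, x.2.1)))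
        :: pvPack mt (rest.drop (pvSpan mt r.2.2 rest)) := by
  conv_lhs => rw [pvPack.eq_def]

-- A's step, re-expressed through B's record preparation (same content/token computation)
theorem pvStepA_eq_prepare (mt : Int)
    (st : List (List (String × String)) × List (String × String) × Int)
    (fp : String × String) :
    pvStepA mt st fp =
      (let r := pvPrepare mt fp
       let st' :=
         if mt < st.2.2 + r.2.2 ∧ st.2.1 ≠ [] then
           (st.1 ++ [st.2.1], ([] : List (String × String)), (0 : Int))
         else st
       (st'.1, st'.2.1 ++ [pvProj r], st'.2.2 + r.2.2)) := by
  unfold pvStepA pvPrepare pvProj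
  by_cases h : mt < pvEstimate (pvBlockChars fp.1.toList fp.2.toList) <;> simp [h]

-- A's step on an already-prepared record
def pvStepR (mt : Int)
    (st : List (List (String × String)) × List (String × String) × Int)
    (r : String × String × Int) :
    List (List (String × String)) × List (String × String) × Int :=
  let st' :=
    if mt < st.2.2 + r.2.2 ∧ st.2.1 ≠ [] then
      (st.1 ++ [st.2.1], ([] : List (String × String)), (0 : Int))
    else st
  (st'.1, st'.2.1 ++ [pvProj r], st'.2.2 + r.2.2)

theorem pvFold_files_eq_records (mt : Int) (files : List (String × String)) (st) :
    files.foldl (pvStepA mt) st = (files.map (pvPrepare mt)).foldl (pvStepR mt) st := by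
  induction files generalizing st with
  | nil => rfl
  | cons fp rest ih =>
    simp only [List.foldl_cons, List.map_cons, pvStepA_eq_prepare, ih]
    rfl

-- the invariant: from a nonempty current chunk with running total ct, A's remaining fold
-- produces exactly the chunks B obtains by span-and-slice
theorem pvFold_eq_pack (mt : Int) (rs : List (String × String × Int))
    (chunks : List (List (String × String))) (current : List (String × String)) (ct : Int)
    (hcur : current ≠ []) :
    (let st := rs.foldl (pvStepR mt) (chunks, current, ct)
     if st.2.1 ≠ [] then st.1 ++ [st.2.1] else st.1)
      = chunks ++ (current ++ (rs.take (pvSpan mt ct rs)).map pvProj)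
          :: pvPack mt (rs.drop (pvSpan mt ct rs)) := by
  induction rs generalizing chunks current ct with
  | nil => simp [pvSpan, pvPack_nil, hcur]
  | cons r rest ih =>
    by_cases h : ct + r.2.2 ≤ mt
    · have hnf : ¬ (mt < ct + r.2.2 ∧ current ≠ []) := by omega
      have : pvSpan mt ct (r :: rest) = 1 + pvSpan mt (ct + r.2.2) rest := by
        simp [pvSpan, h]
      simp only [List.foldl_cons, pvStepR, hnf, if_neg, not_false_iff, this]
      rw [ih _ (current ++ [pvProj r]) (ct + r.2.2) (by simp)]
      simp [List.take_succ_cons, List.drop_succ_cons, Nat.add_comm 1]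
    · have hf : mt < ct + r.2.2 ∧ current ≠ [] := ⟨by omega, hcur⟩
      have hs : pvSpan mt ct (r :: rest) = 0 := by simp [pvSpan]; omega
      have hlt : mt < ct + r.2.2 := by omega
      simp only [List.foldl_cons, pvStepR, hlt, hcur, hs, ne_eq, not_false_eq_true, and_self,
        if_true, List.nil_append]
      rw [ih (chunks ++ [current]) [pvProj r] (0 + r.2.2) (by simp)]
      simp [pvPack_cons, pvProj, List.append_assoc]
      rfl

-- ===== VERDICT =====
theorem chunk_files_by_tokens_spec : Claim_equal_chunk_files_by_tokens := by
  intro files max_tokens _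
  unfold Spec_chunk_files_by_tokens chunk_files_by_tokens chunk_files_by_tokens_alt
  rw [pvFold_files_eq_records]
  cases hm : files.map (pvPrepare max_tokens) with
  | nil => simp [pvPack_nil]
  | cons r rest =>
    have h0 : ¬ (max_tokens < (0:Int) + r.2.2 ∧ ([] : List (String × String)) ≠ []) := by simp
    simp only [List.foldl_cons, pvStepR, h0, if_neg, not_false_iff]
    rw [show ([] : List (String × String)) ++ [pvProj r] = [pvProj r] from rfl,
      pvFold_eq_pack max_tokens rest [] [pvProj r] (0 + r.2.2) (by simp)]
    simp [pvPack_cons, pvProj]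
    rfl
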